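-- pv_equiv track=rewrite | github.com/joenpeter/advent2020 | lib/calculate.py | list_diff_size
-- ===== SOURCE A (Python) =====
-- def list_diff_size(list):
--    previous = 0
--    result = []
--    for n in list:
--       current = n - previous
--       previous = n
--       result.append(current)
--    return result
-- ===== SOURCE B (Python) =====
-- def list_diff_size(list):
--    out = []
--    i = len(list) - 1
--    while i > 0:
--       out.append(list[i] - list[i - 1])
--       i -= 1
--    if list:
--       out.append(list[0])
--    out.reverse()
--    return out
-- ===== Notes on version B (the rewrite author's own statement) =====
-- stated objective: alternative
-- what changed: Traverses the list back-to-front by index, pairing each element with its left neighbour via random access (no running 'previous' state), emits the first element's zero-baseline difference as a separate final step, and reverses the collected output at the end.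
import Mathlib
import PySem

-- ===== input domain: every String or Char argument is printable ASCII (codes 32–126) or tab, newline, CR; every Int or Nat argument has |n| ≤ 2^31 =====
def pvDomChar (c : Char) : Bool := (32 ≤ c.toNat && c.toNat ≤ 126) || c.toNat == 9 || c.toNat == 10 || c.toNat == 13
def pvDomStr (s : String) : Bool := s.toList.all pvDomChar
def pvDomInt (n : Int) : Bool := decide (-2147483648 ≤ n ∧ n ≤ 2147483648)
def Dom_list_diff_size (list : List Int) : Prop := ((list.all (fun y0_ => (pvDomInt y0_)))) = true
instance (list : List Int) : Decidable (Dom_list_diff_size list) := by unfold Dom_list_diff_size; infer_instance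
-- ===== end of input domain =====

-- ===== PORT A =====
-- Port of A: loop threading (previous, result) via foldl, one step per element.
def list_diff_size (list : List Int) : List Int :=
  (list.foldl (fun (st : Int × List Int) n =>
      let current := n - st.1
      (n, st.2 ++ [current])) (0, [])).2

-- ===== PORT B =====
-- Port of B's while-loop: i counts down from len-1 while i > 0, appending list[i] - list[i-1].
-- All indexed accesses are in range by construction, so List.getD is exact here.
def pvBLoop (l : List Int) (out : List Int) : Nat → List Int
  | 0 => out
  | Nat.succ j => pvBLoop l (out ++ [l.getD (j + 1) 0 - l.getD j 0]) j

-- Port of B: backward index walk, then the first element, then reverse the output.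
def list_diff_size_alt (list : List Int) : List Int :=
  let out := pvBLoop list [] (list.length - 1)
  let out := if list.isEmpty then out else out ++ [list.getD 0 0]
  out.reverse

-- ===== PRECONDITION & SPEC =====
def Spec_list_diff_size (list : List Int) (out : List Int) : Prop := out = list_diff_size_alt list
instance (list : List Int) (out : List Int) : Decidable (Spec_list_diff_size list out) := by unfold Spec_list_diff_size; infer_instance

-- ===== CLAIM (what is proved, stated in full; the proofs are below) =====
def Claim_equal_list_diff_size : Prop := ∀ (list : List Int), Dom_list_diff_size list → Spec_list_diff_size list (list_diff_size list)

-- ===== LEMMAS AND PROOFS =====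

-- Reference form: consecutive differences of l with baseline p.
def pvRef (p : Int) : List Int → List Int
  | [] => []
  | x :: xs => (x - p) :: pvRef x xs

-- A's fold accumulates exactly pvRef.
theorem pvA_fold (l : List Int) (p : Int) (acc : List Int) :
    (l.foldl (fun (st : Int × List Int) n =>
      let current := n - st.1
      (n, st.2 ++ [current])) (p, acc)).2 = acc ++ pvRef p l := by
  induction l generalizing p acc with
  | nil => simp [pvRef]
  | cons x xs ih => simp [List.foldl_cons, ih, pvRef]

-- pvRef as an index map: element j is l[j] - (p :: l)[j].
theorem pvRef_map (l : List Int) (p : Int) :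
    pvRef p l = (List.range l.length).map (fun j => l.getD j 0 - (p :: l).getD j 0) := by
  induction l generalizing p with
  | nil => simp [pvRef]
  | cons x xs ih =>
    rw [pvRef, ih x, List.length_cons, List.range_succ_eq_map, List.map_cons, List.map_map]
    simp [Function.comp]

-- The backward loop collects the index map reversed.
theorem pvBLoop_eq (l : List Int) (out : List Int) (i : Nat) :
    pvBLoop l out i
      = out ++ ((List.range i).map (fun j => l.getD (j + 1) 0 - l.getD j 0)).reverse := by
  induction i generalizing out with
  | zero => simp [pvBLoop]
  | succ j ih => simp [pvBLoop, ih, List.range_succ]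

theorem pvB_ref (l : List Int) : list_diff_size_alt l = pvRef 0 l := by
  cases l with
  | nil => simp [list_diff_size_alt, pvBLoop, pvRef]
  | cons x xs =>
    simp only [list_diff_size_alt, List.isEmpty_cons]
    rw [pvBLoop_eq]
    simp only [List.nil_append, List.length_cons, Nat.add_sub_cancel]
    rw [pvRef, pvRef_map xs x]
    simp [List.getD]

-- ===== VERDICT (by name: the statement is the Claim_ definition above) =====
theorem list_diff_size_spec : Claim_equal_list_diff_size := by
  intro list _
  unfold Spec_list_diff_size
  rw [pvB_ref]
  simpa using pvA_fold list 0 []
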